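-- pv_equiv track=rewrite | github.com/LTHMath/The-Ultimate-Discord-Incremental | number game.py | round_down
-- ===== SOURCE A (Python) =====
-- def digits(numbert):
--   number=str(numbert)
--   int_list = []
--   for i in range(len(number)):
--     int_list.append(int(number[i]))
--   return int_list
--
-- def reverse_digits(digits):
--   result=0
--   for i in range(len(digits)):
--     result+=10**(len(digits)-i-1)*int(digits[i])
--   return result
--
-- def round_down(number,base):
--   x=digits(number)
--   y=[]
--   for i in range(len(x)):
--     if x[i]>=base:
--       new_item=base-1
--     else:
--       new_item=x[i]
--     y.append(new_item)
--   return reverse_digits(y)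
-- ===== SOURCE B (Python) =====
-- def round_down(number, base):
--     result = 0
--     for ch in str(number):
--         d = int(ch)
--         result = result * 10 + (d if d < base else base - 1)
--     return result
-- ===== Notes on version B (the rewrite author's own statement) =====
-- stated objective: simpler
-- what changed: Fuses A's three passes (digits list, cap pass, power-of-10 reconstruction) into one Horner-style loop over str(number) that accumulates result = result*10 + capped digit.
import Mathlib
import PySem

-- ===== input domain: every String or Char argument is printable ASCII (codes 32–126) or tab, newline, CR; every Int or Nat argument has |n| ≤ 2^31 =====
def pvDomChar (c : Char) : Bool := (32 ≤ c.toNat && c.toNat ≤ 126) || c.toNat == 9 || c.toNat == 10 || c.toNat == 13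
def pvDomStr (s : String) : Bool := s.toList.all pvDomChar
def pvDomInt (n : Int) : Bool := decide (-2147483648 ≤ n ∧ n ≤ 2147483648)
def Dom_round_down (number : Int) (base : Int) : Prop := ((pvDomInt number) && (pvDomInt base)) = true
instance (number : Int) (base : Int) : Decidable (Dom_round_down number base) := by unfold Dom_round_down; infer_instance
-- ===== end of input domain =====

-- B fuses A's three passes (digits list, cap pass, power-of-10 reconstruction) into one Horner loop (objective: simpler).

-- ===== PORT A =====
-- digits(numbert): build the list of int(ch) for each character of str(numbert)
def pyDigits (numbert : Int) : List Int :=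
  (PySem.Int.toChars numbert).foldl
    (fun acc c => acc ++ [(PySem.Int.ofChars? [c]).getD 0]) []

-- reverse_digits(digits): sum of 10**(len-i-1) * digits[i]
def pyReverseDigits (ds : List Int) : Int :=
  (List.range ds.length).foldl
    (fun r i => r + 10 ^ (ds.length - i - 1) * ds.getD i 0) 0

def round_down (number : Int) (base : Int) : Int :=
  let x := pyDigits number
  let y := x.foldl (fun acc d => acc ++ [if d ≥ base then base - 1 else d]) []
  pyReverseDigits y

-- ===== PORT B =====
def round_down_alt (number : Int) (base : Int) : Int :=
  (PySem.Int.toChars number).foldl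
    (fun r c =>
      let d := (PySem.Int.ofChars? [c]).getD 0
      r * 10 + (if d < base then d else base - 1)) 0

-- ===== PRECONDITION & SPEC =====
-- Pre_ excludes negative number, where Python A raises ValueError (int('-') on the sign character).
def Pre_round_down (number : Int) (_base : Int) : Prop := 0 ≤ number
instance (number : Int) (base : Int) : Decidable (Pre_round_down number base) := by unfold Pre_round_down; infer_instance
def pvWitness_round_down : Int × Int := (57, 5)

def Spec_round_down (number : Int) (base : Int) (out : Int) : Prop := out = round_down_alt number base
instance (number : Int) (base : Int) (out : Int) : Decidable (Spec_round_down number base out) := by unfold Spec_round_down; infer_instance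

-- ===== CLAIM (what is proved, stated in full; the proofs are below) =====
def Claim_equal_round_down : Prop := ∀ (number : Int) (base : Int), Dom_round_down number base → Pre_round_down number base → Spec_round_down number base (round_down number base)

-- ===== LEMMAS AND PROOFS =====

-- reverse_digits is the Horner fold: step lemma on appending a last digit
lemma pyReverseDigits_append (xs : List Int) (d : Int) :
    pyReverseDigits (xs ++ [d]) = 10 * pyReverseDigits xs + d := by
  unfold pyReverseDigits
  simp only [List.length_append, List.length_cons, List.length_nil, List.range_succ, List.foldl_append, List.foldl_cons, List.foldl_nil]
  rw [PySem.List.foldl_add, PySem.List.foldl_add]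
  have hget : (xs ++ [d]).getD xs.length 0 = d := by
    simp [List.getD]
  rw [hget]
  have hmap : (List.range xs.length).map
      (fun i => 10 ^ (xs.length + 1 - i - 1) * (xs ++ [d]).getD i 0)
      = (List.range xs.length).map (fun i => 10 * (10 ^ (xs.length - i - 1) * xs.getD i 0)) := by
    apply List.map_congr_left
    intro i hi
    rw [List.mem_range] at hi
    have h1 : (xs ++ [d]).getD i 0 = xs.getD i 0 := by
      simp [List.getD, List.getElem?_append_left hi]
    have h2 : xs.length + 1 - i - 1 = (xs.length - i - 1) + 1 := by omega
    rw [h1, h2, pow_succ]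
    ring
  rw [hmap, List.sum_map_mul_left]
  have hpow : xs.length + (0 + 1) - xs.length - 1 = 0 := by omega
  rw [hpow, pow_zero]
  ring

lemma pyReverseDigits_eq_horner (ds : List Int) :
    pyReverseDigits ds = ds.foldl (fun r d => r * 10 + d) 0 := by
  induction ds using List.reverseRecOn with
  | nil => rfl
  | append_singleton xs d ih =>
      rw [pyReverseDigits_append, ih, List.foldl_append]
      simp; ring

theorem round_down_eq_alt (number base : Int) :
    round_down number base = round_down_alt number base := by
  unfold round_down round_down_alt pyDigits
  dsimp only
  rw [PySem.List.foldl_append_singleton_eq_map, PySem.List.foldl_append_singleton_eq_map]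
  simp only [List.nil_append]
  rw [List.map_map, pyReverseDigits_eq_horner, List.foldl_map]
  apply PySem.List.foldl_congr_mem
  intro r c _
  simp only [Function.comp]
  split_ifs with h1 h2 h2 <;> omega

-- ===== VERDICT (by name: the statement is the Claim_ definition above) =====
theorem round_down_spec : Claim_equal_round_down := by
  intro number base _ _
  exact round_down_eq_alt number base
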